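-- pv_equiv track=rewrite | github.com/jhz123-bot/legal-agentic-graphrag | src/evaluation/report_generator.py | _error_matrix_by_question_type
-- ===== SOURCE A (Python) =====
-- from collections import Counter
-- from typing import Any, Dict, List
--
-- def _error_matrix_by_question_type(error_records: List[Dict[str, Any]]) -> Dict[str, Dict[str, int]]:
--     matrix: Dict[str, Counter] = {}
--     for row in error_records:
--         qtype = str(row.get("question_type", "unknown") or "unknown")
--         etype = str(row.get("primary_error_type", "none") or "none")
--         if etype == "none":
--             continue
--         matrix.setdefault(qtype, Counter())
--         matrix[qtype][etype] += 1
--     return {qtype: dict(counter) for qtype, counter in matrix.items()}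
-- ===== SOURCE B (Python) =====
-- from collections import Counter
-- from typing import Any, Dict, List
--
--
-- def _norm(row):
--     qtype = str(row.get("question_type", "unknown") or "unknown")
--     etype = str(row.get("primary_error_type", "none") or "none")
--     return qtype, etype
--
--
-- def _error_matrix_by_question_type(error_records: List[Dict[str, Any]]) -> Dict[str, Dict[str, int]]:
--     pairs = [p for p in map(_norm, error_records) if p[1] != "none"]
--     counts = Counter(pairs)
--     return {
--         q: {e: counts[(q, e)]
--             for e in dict.fromkeys(e2 for q2, e2 in pairs if q2 == q)}
--         for q in dict.fromkeys(q for q, _ in pairs)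
--     }
-- ===== Notes on version B (the rewrite author's own statement) =====
-- stated objective: alternative
-- what changed: Replaces A's single stateful loop that mutates a dict-of-Counters in place by a declarative pipeline: normalize rows into a flat filtered (qtype, etype) pair list, count all pairs once with one Counter, then build the nested dict with comprehensions over first-occurrence-deduplicated keys.
import Mathlib
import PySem

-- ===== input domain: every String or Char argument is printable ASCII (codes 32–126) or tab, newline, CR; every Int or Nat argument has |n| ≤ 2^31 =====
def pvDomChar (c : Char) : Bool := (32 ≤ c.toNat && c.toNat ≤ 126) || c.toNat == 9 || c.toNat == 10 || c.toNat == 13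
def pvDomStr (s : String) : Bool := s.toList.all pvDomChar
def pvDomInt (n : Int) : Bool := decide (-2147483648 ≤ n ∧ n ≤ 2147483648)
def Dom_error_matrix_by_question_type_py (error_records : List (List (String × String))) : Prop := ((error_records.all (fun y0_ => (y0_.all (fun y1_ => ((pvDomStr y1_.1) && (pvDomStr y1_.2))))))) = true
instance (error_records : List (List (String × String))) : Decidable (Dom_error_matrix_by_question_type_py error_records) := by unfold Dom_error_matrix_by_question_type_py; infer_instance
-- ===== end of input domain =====

-- B replaces A's stateful dict-of-Counters loop with a flat pair list + one Counter + comprehension pivot (objective: alternative).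


-- ===== PORT A =====
-- row.get(k, d): first-match lookup in the row's association list (exact: PySem.Dict)
def pvRowGet (row : List (String × String)) (k d : String) : String :=
  (PySem.Dict.mk row).getD k d

-- `s or d` on strings: the empty string is the falsy case (exact for str operands)
def pvOrDefault (s d : String) : String := if s = "" then d else s

def pvQType (row : List (String × String)) : String :=
  pvOrDefault (pvRowGet row "question_type" "unknown") "unknown"

def pvEType (row : List (String × String)) : String :=
  pvOrDefault (pvRowGet row "primary_error_type" "none") "none"

-- one iteration of A's loop body
def pvStepA (m : PySem.Dict String (PySem.Dict String Int)) (row : List (String × String)) :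
    PySem.Dict String (PySem.Dict String Int) :=
  let qtype := pvQType row
  let etype := pvEType row
  if etype = "none" then m
  else
    let m := m.setdefault qtype PySem.Dict.empty
    m.modify qtype PySem.Dict.empty (fun c => c.modify etype 0 (· + 1))

def error_matrix_by_question_type_py (error_records : List (List (String × String))) :
    List (String × List (String × Int)) :=
  ((error_records.foldl pvStepA PySem.Dict.empty).items).map (fun p => (p.1, p.2.items))

-- ===== PORT B =====
def pvNorm (row : List (String × String)) : String × String := (pvQType row, pvEType row)

def error_matrix_by_question_type_py_alt (error_records : List (List (String × String))) :
    List (String × List (String × Int)) :=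
  let pairs := (error_records.map pvNorm).filter (fun p => p.2 != "none")
  let counts := PySem.Dict.counter pairs
  (PySem.List.dedup (pairs.map (fun p => p.1))).map (fun q =>
    (q, (PySem.List.dedup ((pairs.filter (fun p => p.1 == q)).map (fun p => p.2))).map
        (fun e => (e, counts.getD (q, e) 0))))

-- ===== PRECONDITION & SPEC =====
def Spec_error_matrix_by_question_type_py (error_records : List (List (String × String))) (out : List (String × List (String × Int))) : Prop := out = error_matrix_by_question_type_py_alt error_records
instance (error_records : List (List (String × String))) (out : List (String × List (String × Int))) : Decidable (Spec_error_matrix_by_question_type_py error_records out) := by unfold Spec_error_matrix_by_question_type_py; infer_instance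

-- ===== CLAIM (what is proved, stated in full; the proofs are below) =====
def Claim_equal_error_matrix_by_question_type_py : Prop := ∀ (error_records : List (List (String × String))), Dom_error_matrix_by_question_type_py error_records → Spec_error_matrix_by_question_type_py error_records (error_matrix_by_question_type_py error_records)

-- ===== LEMMAS AND PROOFS =====

-- the flat normalized pair list both proofs talk about
def pvPairs (error_records : List (List (String × String))) : List (String × String) :=
  (error_records.map pvNorm).filter (fun p => p.2 != "none")

-- the inner dict (as an items list) B builds for question type q from pair list l
def pvInner (l : List (String × String)) (q : String) : List (String × Int) :=
  (PySem.List.dedup ((l.filter (fun p => p.1 == q)).map (fun p => p.2))).map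
    (fun e => (e, (l.count (q, e) : Int)))

-- the nested matrix as a Dict, in B's canonical shape
def pvMatrix (l : List (String × String)) : PySem.Dict String (PySem.Dict String Int) :=
  PySem.Dict.mk ((PySem.List.dedup (l.map (fun p => p.1))).map
    (fun q => (q, PySem.Dict.mk (pvInner l q))))

-- one pair step of A's loop (the non-skipped case)
def pvBump (m : PySem.Dict String (PySem.Dict String Int)) (p : String × String) :
    PySem.Dict String (PySem.Dict String Int) :=
  (m.setdefault p.1 PySem.Dict.empty).modify p.1 PySem.Dict.empty (fun c => c.modify p.2 0 (· + 1))

theorem pv_find?_keyed {α : Type} (qs : List String) (h : String → α) (q : String) :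
    List.find? (fun p => p.1 == q) (qs.map (fun x => (x, h x))) =
      if q ∈ qs then some (q, h q) else none := by
  induction qs with
  | nil => simp
  | cons a qs ih =>
    by_cases hb : a = q
    · subst hb; simp
    · simp [hb, ih, Ne.symm hb]

theorem pv_any_keyed {α : Type} (qs : List String) (h : String → α) (q : String) :
    (qs.map (fun x => (x, h x))).any (fun p => p.1 == q) = decide (q ∈ qs) := by
  induction qs with
  | nil => simp
  | cons a qs ih =>
    by_cases hb : a = q
    · subst hb; simp
    · simp [hb, ih, Ne.symm hb]

theorem pv_getD_keyed {ν : Type} (qs : List String) (h : String → ν) (q : String) (d : ν) :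
    (PySem.Dict.mk (qs.map (fun x => (x, h x)))).getD q d = if q ∈ qs then h q else d := by
  rw [PySem.Dict.getD, PySem.Dict.get?]
  rw [show (PySem.Dict.mk (qs.map (fun x => (x, h x)))).items = qs.map (fun x => (x, h x)) from rfl, pv_find?_keyed]
  split <;> simp

theorem pv_contains_keyed {α : Type} (qs : List String) (h : String → α) (q : String) :
    (PySem.Dict.mk (qs.map (fun x => (x, h x)))).contains q = decide (q ∈ qs) := by
  rw [PySem.Dict.contains]; exact pv_any_keyed qs h q


theorem pv_inner_unchanged (l : List (String × String)) (q q' e : String) (hne : q' ≠ q) :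
    pvInner (l ++ [(q, e)]) q' = pvInner l q' := by
  simp [pvInner, List.filter_append, List.count_append, Ne.symm hne]

theorem pv_inner_step (l : List (String × String)) (q e : String) :
    (PySem.Dict.mk (pvInner l q)).modify e 0 (· + 1) = PySem.Dict.mk (pvInner (l ++ [(q, e)]) q) := by
  have hfil : (l ++ [(q, e)]).filter (fun p => p.1 == q) = l.filter (fun p => p.1 == q) ++ [(q, e)] := by
    simp [List.filter_append]
  have hcnt : ∀ e', (l ++ [(q, e)]).count (q, e') = l.count (q, e') + if e' = e then 1 else 0 := by
    intro e'
    by_cases h : e' = e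
    · simp [List.count_append, h]
    · simp [List.count_append, h, Prod.ext_iff, Ne.symm h]
  rw [PySem.Dict.modify, pvInner, pv_getD_keyed]
  by_cases he : e ∈ PySem.List.dedup ((l.filter (fun p => p.1 == q)).map (fun p => p.2))
  · rw [if_pos he]
    apply PySem.Dict.ext
    rw [PySem.Dict.items_insert_of_contains _ _ (by rw [pv_contains_keyed]; simpa using he)]
    show _ = pvInner (l ++ [(q, e)]) q
    rw [pvInner, hfil]
    simp only [List.map_append, List.map_cons, List.map_nil, PySem.List.dedup,
      PySem.Set.ofList_append, PySem.Set.update, List.foldl_cons, List.foldl_nil]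
    rw [PySem.Set.add_of_mem (by simpa [PySem.List.dedup] using he)]
    rw [List.map_map]
    show List.map _ (PySem.Set.ofList _) = _
    apply List.map_congr_left
    intro e' _
    by_cases h : e' = e
    · subst h; simp [hcnt]
    · simp [Function.comp, h, hcnt]
  · rw [if_neg he]
    have hnotl : (q, e) ∉ l := by
      intro hmem
      exact he (by
        rw [PySem.List.dedup, PySem.Set.mem_ofList]
        exact List.mem_map.mpr ⟨(q, e), List.mem_filter.mpr ⟨hmem, by simp⟩, rfl⟩)
    apply PySem.Dict.ext
    rw [PySem.Dict.items_insert_of_not_contains _ _ (by rw [pv_contains_keyed]; simpa using he)]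
    show _ = pvInner (l ++ [(q, e)]) q
    rw [pvInner, hfil]
    simp only [List.map_append, List.map_cons, List.map_nil, PySem.List.dedup,
      PySem.Set.ofList_append, PySem.Set.update, List.foldl_cons, List.foldl_nil]
    rw [PySem.Set.add_of_not_mem (by simpa [PySem.List.dedup] using he)]
    rw [List.map_append]
    congr 1
    · apply List.map_congr_left
      intro e' he'
      have h : e' ≠ e := fun hh => he (hh ▸ he')
      simp [hcnt, h]
    · have : l.count (q, e) = 0 := List.count_eq_zero.mpr hnotl
      simp [hcnt, this]



theorem pv_bump_matrix (l : List (String × String)) (q e : String) :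
    pvBump (pvMatrix l) (q, e) = pvMatrix (l ++ [(q, e)]) := by
  have hqs : PySem.List.dedup ((l ++ [(q, e)]).map (fun p => p.1)) =
      PySem.Set.add (PySem.List.dedup (l.map (fun p => p.1))) q := by
    simp only [List.map_append, List.map_cons, List.map_nil, PySem.List.dedup,
      PySem.Set.ofList_append, PySem.Set.update, List.foldl_cons, List.foldl_nil]
  have hcont : (PySem.Dict.mk ((PySem.List.dedup (l.map (fun p => p.1))).map
      (fun q' => (q', PySem.Dict.mk (pvInner l q'))))).contains q =
      decide (q ∈ PySem.List.dedup (l.map (fun p => p.1))) := pv_contains_keyed _ _ _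
  by_cases hq : q ∈ PySem.List.dedup (l.map (fun p => p.1))
  · have hsd : (PySem.Dict.mk ((PySem.List.dedup (l.map (fun p => p.1))).map
        (fun q' => (q', PySem.Dict.mk (pvInner l q'))))).setdefault q PySem.Dict.empty =
        PySem.Dict.mk ((PySem.List.dedup (l.map (fun p => p.1))).map
        (fun q' => (q', PySem.Dict.mk (pvInner l q')))) :=
      PySem.Dict.setdefault_of_contains _ _ (by rw [hcont]; simpa using hq)
    simp only [pvBump, pvMatrix]
    rw [hsd]
    rw [PySem.Dict.modify, pv_getD_keyed, if_pos hq]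
    apply PySem.Dict.ext
    rw [PySem.Dict.items_insert_of_contains _ _ (by rw [pv_contains_keyed]; simpa using hq)]
    show _ = (pvMatrix (l ++ [(q, e)])).items
    rw [pvMatrix, hqs, PySem.Set.add_of_mem hq]
    show List.map _ (List.map _ _) = _
    rw [List.map_map]
    apply List.map_congr_left
    intro q' _
    by_cases h : q' = q
    · subst h; simp [Function.comp, pv_inner_step]
    · simp [Function.comp, h, pv_inner_unchanged l q q' e h]
  · have hq' : q ∉ l.map (fun p => p.1) := by
      rw [PySem.List.dedup, PySem.Set.mem_ofList] at hq; exact hq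
    have hfil : l.filter (fun p => p.1 == q) = [] := by
      rw [List.filter_eq_nil_iff]
      intro p hp
      simp only [beq_iff_eq]
      exact fun hh => hq' (List.mem_map.mpr ⟨p, hp, hh⟩)
    have hcnt : l.count (q, e) = 0 :=
      List.count_eq_zero.mpr (fun hmem => hq' (List.mem_map.mpr ⟨(q, e), hmem, rfl⟩))
    have hinq : pvInner (l ++ [(q, e)]) q = [(e, 1)] := by
      rw [pvInner]
      simp [List.filter_append, hfil, List.count_append, hcnt, PySem.List.dedup,
        PySem.Set.ofList, PySem.Set.add, PySem.Set.empty]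
    -- rewrite the appended items list as a keyed map over qs ++ [q]
    have hkey : (pvMatrix l).items ++ [(q, PySem.Dict.empty)] =
        (PySem.List.dedup (l.map (fun p => p.1)) ++ [q]).map
          (fun q' => (q', if q' = q then PySem.Dict.empty else PySem.Dict.mk (pvInner l q'))) := by
      rw [List.map_append]
      congr 1
      · show List.map _ _ = _
        apply List.map_congr_left
        intro q' hmem
        have : q' ≠ q := fun hh => hq (hh ▸ hmem)
        simp [this]
      · simp
    simp only [pvBump, pvMatrix]
    have hsd : (PySem.Dict.mk ((PySem.List.dedup (l.map (fun p => p.1))).map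
        (fun q' => (q', PySem.Dict.mk (pvInner l q'))))).setdefault q PySem.Dict.empty =
        (PySem.Dict.mk ((PySem.List.dedup (l.map (fun p => p.1))).map
        (fun q' => (q', PySem.Dict.mk (pvInner l q'))))).insert q PySem.Dict.empty :=
      PySem.Dict.setdefault_of_not_contains _ _ (by rw [hcont]; simpa using hq)
    rw [hsd]
    apply PySem.Dict.ext
    rw [PySem.Dict.modify]
    rw [show ((PySem.Dict.mk ((PySem.List.dedup (l.map (fun p => p.1))).map
      (fun q => (q, PySem.Dict.mk (pvInner l q))))).insert q PySem.Dict.empty) =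
      PySem.Dict.mk ((PySem.List.dedup (l.map (fun p => p.1)) ++ [q]).map
        (fun q' => (q', if q' = q then PySem.Dict.empty else PySem.Dict.mk (pvInner l q')))) from by
        apply PySem.Dict.ext
        rw [PySem.Dict.items_insert_of_not_contains _ _ (by rw [pv_contains_keyed]; simpa using hq)]
        exact hkey]
    rw [pv_getD_keyed, if_pos (by simp)]
    rw [PySem.Dict.items_insert_of_contains _ _ (by rw [pv_contains_keyed]; simp)]
    show _ = (pvMatrix (l ++ [(q, e)])).items
    rw [pvMatrix, hqs, PySem.Set.add_of_not_mem hq]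
    show List.map _ (List.map _ _) = _
    rw [List.map_map]
    apply List.map_congr_left
    intro q' hmem
    by_cases h : q' = q
    · subst h
      have hC : (PySem.Dict.empty : PySem.Dict String Int).modify e 0 (· + 1) =
          PySem.Dict.mk [(e, 1)] := by
        apply PySem.Dict.ext
        simp [PySem.Dict.modify, PySem.Dict.insert, PySem.Dict.contains, PySem.Dict.empty,
          PySem.Dict.getD, PySem.Dict.get?]
      simp [Function.comp, hC, hinq]
    · have hm : q' ∈ PySem.List.dedup (l.map (fun p => p.1)) := by
        rcases List.mem_append.mp hmem with h1 | h1
        · exact h1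
        · exact absurd (by simpa using h1) h
      simp [Function.comp, h, pv_inner_unchanged l q q' e h]

theorem pv_foldl_bump (l : List (String × String)) :
    l.foldl pvBump PySem.Dict.empty = pvMatrix l := by
  induction l using List.reverseRecOn with
  | nil => rfl
  | append_singleton l p ih =>
    obtain ⟨q, e⟩ := p
    rw [List.foldl_append, List.foldl_cons, List.foldl_nil, ih, pv_bump_matrix]

theorem pv_foldl_stepA (rs : List (List (String × String)))
    (m : PySem.Dict String (PySem.Dict String Int)) :
    rs.foldl pvStepA m = (pvPairs rs).foldl pvBump m := by
  induction rs generalizing m with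
  | nil => rfl
  | cons r rs ih =>
    by_cases h : pvEType r = "none" <;>
      simp [pvPairs, pvStepA, pvBump, pvNorm, h, ih, List.foldl_cons]

theorem pv_alt_canon (rs : List (List (String × String))) :
    error_matrix_by_question_type_py_alt rs =
      (PySem.List.dedup ((pvPairs rs).map (fun p => p.1))).map
        (fun q => (q, pvInner (pvPairs rs) q)) := by
  simp [error_matrix_by_question_type_py_alt, pvPairs, pvInner, PySem.Dict.getD_counter]

-- ===== VERDICT (by name: the statement is the Claim_ definition above) =====
theorem error_matrix_by_question_type_py_spec : Claim_equal_error_matrix_by_question_type_py := by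
  intro rs _
  show _ = _
  rw [error_matrix_by_question_type_py, pv_foldl_stepA, pv_foldl_bump, pv_alt_canon, pvMatrix]
  simp [pvInner]
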